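-- pv_equiv track=rewrite | github.com/ulzee/traffic | dump_bystops.py | next_stop
-- ===== SOURCE A (Python) =====
-- def next_stop(travel, pstop, mindt=60*5):
--     nexts = []
--     track = False
--     for si, stop in enumerate(travel):
--         if not track:
--             if pstop in stop['stop']:
--                 track = True
--         else:
--             if pstop not in stop['stop']:
--                 track = False
--                 nexts.append(stop)
--     return nexts
-- ===== SOURCE B (Python) =====
-- def next_stop(travel, pstop, mindt=60*5):
--     # staged index-set approach: build the set of indices whose stop mentions
--     # pstop once, then emit the successor of each hit index whose successor is
--     # not itself a hit (no carried state, no pairwise scan).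
--     hits = {i for i, stop in enumerate(travel) if pstop in stop['stop']}
--     return [travel[i + 1] for i in sorted(hits)
--             if i + 1 < len(travel) and i + 1 not in hits]
-- ===== Notes on version B (the rewrite author's own statement) =====
-- stated objective: alternative
-- what changed: Replaced A's single-pass boolean `track` state machine with two staged passes: first build the set of indices whose stop mentions pstop, then emit travel[i+1] for each hit index i whose successor index is not itself a hit.
import Mathlib
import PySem

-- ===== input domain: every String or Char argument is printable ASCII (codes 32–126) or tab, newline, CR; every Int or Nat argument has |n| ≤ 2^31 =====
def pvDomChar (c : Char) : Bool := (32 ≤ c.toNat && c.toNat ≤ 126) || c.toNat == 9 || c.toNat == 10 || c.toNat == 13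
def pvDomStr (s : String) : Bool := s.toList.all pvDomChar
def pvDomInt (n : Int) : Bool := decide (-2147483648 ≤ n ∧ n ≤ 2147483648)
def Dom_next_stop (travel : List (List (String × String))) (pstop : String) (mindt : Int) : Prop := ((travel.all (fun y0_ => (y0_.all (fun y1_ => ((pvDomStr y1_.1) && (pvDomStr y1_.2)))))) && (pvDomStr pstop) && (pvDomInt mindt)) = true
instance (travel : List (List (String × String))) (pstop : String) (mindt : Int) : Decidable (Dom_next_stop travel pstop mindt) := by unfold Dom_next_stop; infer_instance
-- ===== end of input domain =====

-- B replaces A's carried `track` boolean state machine by two staged passes: it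
-- first builds the set of indices whose stop mentions pstop, then emits the
-- successor of every hit index whose successor is not itself a hit (objective:
-- alternative). Pre_ excludes inputs where some dict lacks the key "stop"
-- (both Pythons raise KeyError there).

-- shared tiny helper: Python's `pstop in stop['stop']` (getD "" is exact under Pre_,
-- which guarantees the key is present)
def pvStopHas (stop : List (String × String)) (pstop : String) : Bool :=
  PySem.Str.isIn pstop ((PySem.Dict.mk stop).getD "stop" "")

-- ===== PORT A =====
def next_stop (travel : List (List (String × String))) (pstop : String) (mindt : Int) : List (List (String × String)) :=
  (travel.foldl
    (fun (st : List (List (String × String)) × Bool) stop =>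
      if !st.2 then
        if pvStopHas stop pstop then (st.1, true) else st
      else
        if !(pvStopHas stop pstop) then (st.1 ++ [stop], false) else st)
    ([], false)).1

-- ===== PORT B =====
-- hits = {i for i, stop in enumerate(travel) if pstop in stop['stop']}
-- return [travel[i+1] for i in sorted(hits) if i+1 < len(travel) and i+1 not in hits]
-- Python's local `hits` set as a named helper
def pvHits (travel : List (List (String × String))) (pstop : String) : List Int :=
  PySem.Set.ofList
    ((PySem.List.enumerate travel).filterMap
      (fun p => if pvStopHas p.2 pstop then some p.1 else none))

def next_stop_alt (travel : List (List (String × String))) (pstop : String) (mindt : Int) : List (List (String × String)) :=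
  (PySem.List.sorted (pvHits travel pstop) (fun i => i) false).filterMap
    (fun i =>
      if (i + 1 < (travel.length : Int)) && !(PySem.Set.contains (pvHits travel pstop) (i + 1)) then
        PySem.List.pyGet? travel (i + 1)
      else none)

-- ===== PRECONDITION & SPEC =====
-- Pre_ excludes exactly the inputs on which Python A raises KeyError: some entry lacks key "stop".
def Pre_next_stop (travel : List (List (String × String))) (pstop : String) (mindt : Int) : Prop :=
  ∀ stop ∈ travel, ((PySem.Dict.mk stop).get? "stop").isSome
instance (travel : List (List (String × String))) (pstop : String) (mindt : Int) : Decidable (Pre_next_stop travel pstop mindt) := by unfold Pre_next_stop; infer_instance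

def pvWitness_next_stop : (List (List (String × String))) × String × Int :=
  ([[("stop", "A12 B7")], [("stop", "C3")], [("stop", "A12")]], "A12", 300)

def Spec_next_stop (travel : List (List (String × String))) (pstop : String) (mindt : Int) (out : List (List (String × String))) : Prop := out = next_stop_alt travel pstop mindt
instance (travel : List (List (String × String))) (pstop : String) (mindt : Int) (out : List (List (String × String))) : Decidable (Spec_next_stop travel pstop mindt out) := by unfold Spec_next_stop; infer_instance

-- ===== CLAIM (what is proved, stated in full; the proofs are below) =====
def Claim_equal_next_stop : Prop := ∀ (travel : List (List (String × String))) (pstop : String) (mindt : Int), Dom_next_stop travel pstop mindt → Pre_next_stop travel pstop mindt → Spec_next_stop travel pstop mindt (next_stop travel pstop mindt)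

-- ===== LEMMAS AND PROOFS =====

-- proof-only intermediate: the "transition pairs" form both ports are reduced to
def pvPair (travel : List (List (String × String))) (pstop : String) : List (List (String × String)) :=
  (travel.zip travel.tail).filterMap
    (fun pc => if pvStopHas pc.1 pstop && !(pvStopHas pc.2 pstop) then some pc.2 else none)

-- proof-only name for B's first pass (with an arbitrary enumerate start)
def pvRaw (xs : List (List (String × String))) (pstop : String) (s : Int) : List Int :=
  (PySem.List.enumerate xs s).filterMap (fun p => if pvStopHas p.2 pstop then some p.1 else none)

-- ---- A-side: the fold with its flag set after element x equals pvPair over x :: rest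
theorem pv_fold_inv (pstop : String) (rest : List (List (String × String)))
    (x : List (String × String)) (acc : List (List (String × String))) :
    (rest.foldl
      (fun (st : List (List (String × String)) × Bool) stop =>
        if !st.2 then
          if pvStopHas stop pstop then (st.1, true) else st
        else
          if !(pvStopHas stop pstop) then (st.1 ++ [stop], false) else st)
      (acc, pvStopHas x pstop)).1
    = acc ++ ((x :: rest).zip rest).filterMap
        (fun pc => if pvStopHas pc.1 pstop && !(pvStopHas pc.2 pstop) then some pc.2 else none) := by
  induction rest generalizing x acc with
  | nil => simp
  | cons y rs ih =>
    simp only [List.foldl_cons, List.zip_cons_cons, List.filterMap_cons]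
    by_cases hx : pvStopHas x pstop = true <;>
      by_cases hy : pvStopHas y pstop = true
    · have h := ih y acc; rw [hy] at h
      simp [hx, hy] at h ⊢; exact h
    · have h := ih y (acc ++ [y]); rw [eq_false_of_ne_true hy] at h
      simp [hx, hy, List.append_assoc] at h ⊢; exact h
    · have h := ih y acc; rw [hy] at h
      simp [hx, hy] at h ⊢; exact h
    · have h := ih y acc; rw [eq_false_of_ne_true hy] at h
      simp [hx, hy] at h ⊢; exact h

theorem pv_A_eq_pair (travel : List (List (String × String))) (pstop : String) (mindt : Int) :
    next_stop travel pstop mindt = pvPair travel pstop := by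
  unfold next_stop pvPair
  cases travel with
  | nil => simp
  | cons x rest =>
    simp only [List.foldl_cons, List.tail_cons]
    by_cases hx : pvStopHas x pstop = true
    · simpa [hx] using pv_fold_inv pstop rest x []
    · have hx' : pvStopHas x pstop = false := by simpa using hx
      have := pv_fold_inv pstop rest x []
      rw [hx'] at this
      simpa [hx'] using this

-- ---- B-side lemmas
theorem pv_mem_raw (pstop : String) (xs : List (List (String × String))) (s i : Int) :
    i ∈ pvRaw xs pstop s ↔
      ∃ (k : Nat), ∃ (h : k < xs.length), i = s + k ∧ pvStopHas xs[k] pstop = true := by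
  induction xs generalizing s with
  | nil => simp [pvRaw]
  | cons x ys ih =>
    unfold pvRaw
    rw [PySem.List.enumerate_cons, List.filterMap_cons]
    have hys : ∀ s', (List.filterMap (fun p => if pvStopHas p.2 pstop = true then some p.1 else none)
        (PySem.List.enumerate ys s')) = pvRaw ys pstop s' := fun _ => rfl
    by_cases hx : pvStopHas x pstop = true
    · simp only [hx, if_pos, List.mem_cons, hys]
      constructor
      · rintro (rfl | hm)
        · exact ⟨0, by simp, by simp, by simpa using hx⟩
        · obtain ⟨k, hk, hi, hf⟩ := (ih (s + 1)).mp hm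
          refine ⟨k + 1, by simp; omega, by push_cast at hi ⊢; omega, by simpa using hf⟩
      · rintro ⟨k, hk, hi, hf⟩
        cases k with
        | zero => left; simpa using hi
        | succ k' =>
          right
          refine (ih (s + 1)).mpr ⟨k', by simp at hk; omega, by push_cast at hi ⊢; omega, by simpa using hf⟩
    · have hx' : pvStopHas x pstop = false := by simpa using hx
      simp only [hx', if_neg, Bool.false_eq_true, not_false_iff, hys]
      constructor
      · intro hm
        obtain ⟨k, hk, hi, hf⟩ := (ih (s + 1)).mp hm
        refine ⟨k + 1, by simp; omega, by push_cast at hi ⊢; omega, by simpa using hf⟩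
      · rintro ⟨k, hk, hi, hf⟩
        cases k with
        | zero => exact absurd (by simpa using hf) (by simp [hx'])
        | succ k' =>
          refine (ih (s + 1)).mpr ⟨k', by simp at hk; omega, by push_cast at hi ⊢; omega, by simpa using hf⟩

theorem pv_raw_pairwise (pstop : String) (xs : List (List (String × String))) (s : Int) :
    (pvRaw xs pstop s).Pairwise (· < ·) := by
  induction xs generalizing s with
  | nil => simp [pvRaw]
  | cons x ys ih =>
    unfold pvRaw
    rw [PySem.List.enumerate_cons, List.filterMap_cons]
    have hys : (List.filterMap (fun p => if pvStopHas p.2 pstop = true then some p.1 else none)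
        (PySem.List.enumerate ys (s + 1))) = pvRaw ys pstop (s + 1) := rfl
    have hmem : ∀ j ∈ pvRaw ys pstop (s + 1), s < j := by
      intro j hj
      obtain ⟨k, hk, hj', _⟩ := (pv_mem_raw pstop ys (s + 1) j).mp hj
      have : (0 : Int) ≤ (k : Int) := Int.natCast_nonneg k
      omega
    by_cases hx : pvStopHas x pstop = true
    · simp only [hx, if_pos, hys]
      exact List.Pairwise.cons hmem (ih (s + 1))
    · have hx' : pvStopHas x pstop = false := by simpa using hx
      simp only [hx', Bool.false_eq_true, if_neg, not_false_iff, hys]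
      exact ih (s + 1)

-- pvHits is just the first pass: ofList of a Nodup list
theorem pv_hits_eq (travel : List (List (String × String))) (pstop : String) :
    pvHits travel pstop = pvRaw travel pstop 0 :=
  PySem.Set.ofList_eq_self_of_nodup _
    ((pv_raw_pairwise pstop travel 0).imp (fun h => ne_of_lt h))

-- the if-condition of B's second pass, rewritten through pyGet? for members of the hit list
theorem pv_cond_eq (travel : List (List (String × String))) (pstop : String) :
    ∀ i ∈ pvRaw travel pstop 0,
      (if (i + 1 < (travel.length : Int)) && !(PySem.Set.contains (pvRaw travel pstop 0) (i + 1)) then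
        PySem.List.pyGet? travel (i + 1)
      else none)
      = (PySem.List.pyGet? travel (i + 1)).bind
          (fun t => if pvStopHas t pstop then none else some t) := by
  intro i hi
  obtain ⟨k, hk, hik, -⟩ := (pv_mem_raw pstop travel 0 i).mp hi
  have hik' : i = (k : Int) := by omega
  subst hik'
  have hcast : (k : Int) + 1 = ((k + 1 : Nat) : Int) := by push_cast; ring
  rw [hcast, PySem.List.pyGet?_of_nonneg travel (Int.natCast_nonneg _)]
  simp only [Int.toNat_natCast]
  by_cases hlt : k + 1 < travel.length
  · have hget : travel[k + 1]? = some travel[k + 1] := List.getElem?_eq_getElem hlt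
    rw [hget]
    have hcont : PySem.Set.contains (pvRaw travel pstop 0) ((k + 1 : Nat) : Int)
        = pvStopHas travel[k + 1] pstop := by
      by_cases hf : pvStopHas travel[k + 1] pstop = true
      · rw [hf, (PySem.Set.contains_iff _ _).mpr]
        exact (pv_mem_raw pstop travel 0 _).mpr ⟨k + 1, hlt, by push_cast; ring, hf⟩
      · have hf' : pvStopHas travel[k + 1] pstop = false := by simpa using hf
        rw [hf']
        by_contra hc
        have hc' : PySem.Set.contains (pvRaw travel pstop 0) ((k + 1 : Nat) : Int) = true :=
          by cases h : PySem.Set.contains (pvRaw travel pstop 0) ((k + 1 : Nat) : Int)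
             · exact absurd h hc
             · rfl
        obtain ⟨k', hk', he, hf2⟩ := (pv_mem_raw pstop travel 0 _).mp ((PySem.Set.contains_iff _ _).mp hc')
        have hke : k' = k + 1 := by omega
        subst hke; simp [hf'] at hf2
    rw [hcont]
    have hlt2 : (k : Int) + 1 < (travel.length : Int) := by omega
    by_cases hf : pvStopHas travel[k + 1] pstop = true <;> simp [hf, hlt2]
  · have hnone : travel[k + 1]? = none := List.getElem?_eq_none (by omega)
    rw [hnone]
    have hge : ¬ ((k : Int) + 1 < (travel.length : Int)) := by omega
    simp [hge]

-- B's staged passes, composed over enumerate, equal the transition-pair form (offset-generalised)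
theorem pv_enum_pair (travel : List (List (String × String))) (pstop : String) :
    ∀ (xs : List (List (String × String))) (k : Nat), travel.drop k = xs →
      (PySem.List.enumerate xs (k : Int)).filterMap
        (fun p => if pvStopHas p.2 pstop then
            (PySem.List.pyGet? travel (p.1 + 1)).bind
              (fun t => if pvStopHas t pstop then none else some t)
          else none)
      = (xs.zip xs.tail).filterMap
          (fun pc => if pvStopHas pc.1 pstop && !(pvStopHas pc.2 pstop) then some pc.2 else none) := by
  intro xs
  induction xs with
  | nil => simp
  | cons x ys ih =>
    intro k hdrop
    have hdrop' : travel.drop (k + 1) = ys := by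
      rw [← List.drop_drop, hdrop]; simp
    have hget1 : PySem.List.pyGet? travel ((k : Int) + 1) = ys[0]? := by
      have hcast : (k : Int) + 1 = ((k + 1 : Nat) : Int) := by push_cast; ring
      rw [hcast, PySem.List.pyGet?_of_nonneg travel (Int.natCast_nonneg _)]
      simp only [Int.toNat_natCast]
      rw [← hdrop', List.getElem?_drop]
    rw [PySem.List.enumerate_cons, List.filterMap_cons]
    have hih := ih (k + 1) hdrop'
    have hcast2 : ((k + 1 : Nat) : Int) = (k : Int) + 1 := by push_cast; ring
    rw [hcast2] at hih
    cases ys with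
    | nil =>
      simp only [List.getElem?_nil] at hget1
      by_cases hx : pvStopHas x pstop = true <;> simp [hx, hget1]
    | cons y t =>
      simp only [List.getElem?_cons_zero] at hget1
      simp only [List.tail_cons, List.zip_cons_cons, List.filterMap_cons] at hih ⊢
      by_cases hx : pvStopHas x pstop = true <;>
        by_cases hy : pvStopHas y pstop = true <;>
        (simp [hx, hy, hget1] at hih ⊢) <;> exact hih

theorem pv_B_eq_pair (travel : List (List (String × String))) (pstop : String) (mindt : Int) :
    next_stop_alt travel pstop mindt = pvPair travel pstop := by
  unfold next_stop_alt
  rw [pv_hits_eq]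
  have hpw := pv_raw_pairwise pstop travel 0
  rw [PySem.List.sorted_eq_self_of_pairwise _ _ (hpw.imp (fun h => le_of_lt h)),
      List.filterMap_congr (pv_cond_eq travel pstop)]
  have hcomp : (pvRaw travel pstop 0).filterMap
      (fun i => (PySem.List.pyGet? travel (i + 1)).bind
        (fun t => if pvStopHas t pstop then none else some t))
      = (PySem.List.enumerate travel ((0 : Nat) : Int)).filterMap
        (fun p => if pvStopHas p.2 pstop then
            (PySem.List.pyGet? travel (p.1 + 1)).bind
              (fun t => if pvStopHas t pstop then none else some t)
          else none) := by
    unfold pvRaw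
    rw [List.filterMap_filterMap]
    apply List.filterMap_congr
    intro p _
    by_cases hp : pvStopHas p.2 pstop = true <;> simp [hp]
  rw [hcomp, pv_enum_pair travel pstop travel 0 (by simp)]
  rfl

-- ===== VERDICT (by name: the statement is the Claim_ definition above) =====
theorem next_stop_spec : Claim_equal_next_stop := by
  intro travel pstop mindt _ _
  unfold Spec_next_stop
  rw [pv_A_eq_pair, pv_B_eq_pair]
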